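-- pv_equiv track=rewrite | github.com/ASSERT-KTH/Mokav | experiments/pynguin/c4b/return-lst/generated_tests/src_713/0/src_713.py | func
-- ===== SOURCE A (Python) =====
-- def func(*args):
-- 	ret_values = []
--
-- 	n = int(args[0])
-- 	for i in range((n // 7), (- 1), (- 1)):
-- 	    t = (n - (i * 7))
-- 	    if ((t % 4) == 0):
-- 	        l = ''.join([('7' * i)])
-- 	        ll = ''.join([('4' * (t // 4))])
-- 	        ret_values.append(''.join([ll, l]))
-- 	        break
-- 	else:
-- 	    ret_values.append((- 1))
--
-- 	return ret_values
-- ===== SOURCE B (Python) =====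
-- def func(*args):
--     ret_values = []
--     n = int(args[0])
--     if n < 0:
--         ret_values.append(-1)
--     else:
--         m = n // 7
--         b = m - ((m - 3 * n) % 4)
--         if b < 0:
--             ret_values.append(-1)
--         else:
--             a = (n - 7 * b) // 4
--             ret_values.append('4' * a + '7' * b)
--     return ret_values
-- ===== Notes on version B (the rewrite author's own statement) =====
-- stated objective: simpler
-- what changed: Replaces A's downward search loop over i = n//7..0 with a direct modular-arithmetic computation of the largest count b of 7s (b = m - ((m - 3n) % 4) with m = n//7), producing the identical string without any loop.
-- outside the precondition, e.g. on func(-1): A returns [-1], B returns [-1]; on func(-3): A returns [-1], B returns [-1]; on func(5): A returns [-1], B returns [-1]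
import Mathlib
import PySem

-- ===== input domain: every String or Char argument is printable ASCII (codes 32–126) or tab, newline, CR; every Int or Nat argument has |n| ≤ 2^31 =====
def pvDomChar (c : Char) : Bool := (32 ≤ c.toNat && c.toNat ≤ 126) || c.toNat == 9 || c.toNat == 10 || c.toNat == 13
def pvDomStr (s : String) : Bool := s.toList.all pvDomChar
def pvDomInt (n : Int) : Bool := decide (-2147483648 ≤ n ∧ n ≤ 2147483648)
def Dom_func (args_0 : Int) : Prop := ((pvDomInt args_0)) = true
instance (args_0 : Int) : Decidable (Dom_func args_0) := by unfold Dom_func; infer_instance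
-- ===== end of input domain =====

-- B replaces A's downward search loop by a closed-form modular computation of the
-- same largest count of 7s (objective: simpler; return value only).

-- ===== PORT A =====
-- A's loop: first i from n//7 down to 0 with (n - 7*i) % 4 == 0 builds the string and
-- breaks; on the else-branch Python appends the INT -1 (not a str) — those inputs are
-- excluded by Pre_func, and the port returns [] there.
def pvLoopA (n : Int) : List Int → List String
  | [] => []          -- Python: ret_values.append(-1) — an int, outside List String
  | i :: rest =>
    let t := n - i * 7
    if PySem.Int.mod t 4 = 0 then
      let l := PySem.Str.join "" [String.ofList (PySem.List.pyRepeat ['7'] i)]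
      let ll := PySem.Str.join "" [String.ofList (PySem.List.pyRepeat ['4'] (PySem.Int.floordiv t 4))]
      [PySem.Str.join "" [ll, l]]
    else pvLoopA n rest

def func (args_0 : Int) : List String :=
  pvLoopA args_0 (PySem.List.pyRange (PySem.Int.floordiv args_0 7) (-1) (-1))

-- ===== PORT B =====
def func_alt (args_0 : Int) : List String :=
  if args_0 < 0 then []       -- Python: ret_values.append(-1) — excluded by Pre_func
  else
    let m := PySem.Int.floordiv args_0 7
    let b := m - PySem.Int.mod (m - 3 * args_0) 4
    if b < 0 then []            -- Python: ret_values.append(-1) — excluded by Pre_func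
    else
      let a := PySem.Int.floordiv (args_0 - 7 * b) 4
      [String.ofList (PySem.List.pyRepeat ['4'] a ++ PySem.List.pyRepeat ['7'] b)]

-- ===== PRECONDITION & SPEC =====
-- Pre_ excludes the inputs (negative n and the nine non-representable nonnegative n)
-- on which A appends the int -1 to the result list, a value outside the declared
-- return type list[str]; B appends the same int -1 there.
def Pre_func (args_0 : Int) : Prop :=
  0 ≤ args_0 ∧ args_0 ∉ ([1, 2, 3, 5, 6, 9, 10, 13, 17] : List Int)
instance (args_0 : Int) : Decidable (Pre_func args_0) := by unfold Pre_func; infer_instance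

def pvWitness_func : Int := (11)

def Spec_func (args_0 : Int) (out : List String) : Prop := out = func_alt args_0
instance (args_0 : Int) (out : List String) : Decidable (Spec_func args_0 out) := by unfold Spec_func; infer_instance

-- ===== CLAIM (what is proved, stated in full; the proofs are below) =====
def Claim_equal_func : Prop := ∀ (args_0 : Int), Dom_func args_0 → Pre_func args_0 → Spec_func args_0 (func args_0)

-- ===== LEMMAS AND PROOFS =====

-- B's branch value as a function of n and the chosen count b of 7s.
def pvBuild (n b : Int) : List String :=
  if b < 0 then []
  else [String.ofList (PySem.List.pyRepeat ['4'] (PySem.Int.floordiv (n - 7 * b) 4) ++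
                   PySem.List.pyRepeat ['7'] b)]

lemma pvJoin_pair (s t : String) :
    PySem.Str.join "" [s, t] = String.ofList (s.toList ++ t.toList) := by
  simp [PySem.Str.join, PySem.Chars.join, List.intercalate, List.intersperse]

lemma pvJoin_single (s : String) : PySem.Str.join "" [s] = s := by
  simp [PySem.Str.join, PySem.Chars.join, List.intercalate]

lemma pvMod4 (x : Int) : PySem.Int.mod x 4 = x % 4 :=
  PySem.Int.mod_eq_emod_of_pos (by norm_num)

-- a loop step whose condition fires produces B's string for count i
lemma pvLoopA_hit (n i : Int) (rest : List Int) (hi : 0 ≤ i)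
    (hc : PySem.Int.mod (n - i * 7) 4 = 0) :
    pvLoopA n (i :: rest) = pvBuild n i := by
  simp only [pvLoopA, hc]
  rw [pvJoin_single, pvJoin_single, pvJoin_pair, pvBuild, if_neg (not_lt.mpr hi),
      show n - i * 7 = n - 7 * i from by ring]
  simp

lemma pvLoopA_miss (n i : Int) (rest : List Int)
    (hc : ¬ PySem.Int.mod (n - i * 7) 4 = 0) :
    pvLoopA n (i :: rest) = pvLoopA n rest := by
  simp only [pvLoopA]
  rw [if_neg hc]

-- the countdown loop from k computes B's closed form
lemma pvLoopA_eq (k : Nat) (n : Int) :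
    pvLoopA n (PySem.List.pyRange (k : Int) (-1) (-1)) =
      pvBuild n ((k : Int) - PySem.Int.mod ((k : Int) - 3 * n) 4) := by
  induction k with
  | zero =>
    rw [PySem.List.pyRange_neg_one_cons (by norm_num),
        PySem.List.pyRange_neg_one_eq_nil (by norm_num)]
    by_cases hd : (4 : Int) ∣ (n - (0 : Int) * 7)
    · have hc : PySem.Int.mod (n - ((0 : Nat) : Int) * 7) 4 = 0 :=
        (PySem.Int.mod_eq_zero_iff_dvd _ _).mpr (by push_cast; omega)
      rw [show ((0:Nat):Int) = (0:Int) from by norm_num] at hc ⊢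
      rw [pvLoopA_hit n 0 _ le_rfl hc]
      have hb : PySem.Int.mod ((0 : Int) - 3 * n) 4 = 0 :=
        (PySem.Int.mod_eq_zero_iff_dvd _ _).mpr (by omega)
      rw [hb]; norm_num
    · have hc : ¬ PySem.Int.mod (n - (0 : Int) * 7) 4 = 0 := by
        rw [PySem.Int.mod_eq_zero_iff_dvd]; exact hd
      rw [show ((0:Nat):Int) = (0:Int) from by norm_num]
      rw [pvLoopA_miss n 0 _ hc]
      simp only [pvLoopA]
      rw [pvBuild, if_pos]
      rw [pvMod4]
      rw [pvMod4] at hc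
      omega
  | succ k ih =>
    rw [PySem.List.pyRange_neg_one_cons (by push_cast; omega),
        show ((k + 1 : Nat) : Int) - 1 = (k : Int) from by push_cast; ring]
    by_cases hd : (4 : Int) ∣ (n - ((k + 1 : Nat) : Int) * 7)
    · have hc : PySem.Int.mod (n - ((k + 1 : Nat) : Int) * 7) 4 = 0 :=
        (PySem.Int.mod_eq_zero_iff_dvd _ _).mpr hd
      rw [pvLoopA_hit n _ _ (by positivity) hc]
      have hb : PySem.Int.mod (((k + 1 : Nat) : Int) - 3 * n) 4 = 0 :=
        (PySem.Int.mod_eq_zero_iff_dvd _ _).mpr (by push_cast at hd ⊢; omega)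
      rw [hb]; norm_num
    · have hc : ¬ PySem.Int.mod (n - ((k + 1 : Nat) : Int) * 7) 4 = 0 := by
        rw [PySem.Int.mod_eq_zero_iff_dvd]; exact hd
      rw [pvLoopA_miss n _ _ hc, ih]
      congr 1
      rw [pvMod4, pvMod4]
      push_cast
      push_cast at hd
      have hb : ¬ (4:Int) ∣ (((k:Int)+1) - 3*n) := by omega
      have h1 : (((k:Int)+1) - 3*n) % 4 ≠ 0 := by omega
      have h2 : ((k:Int) - 3*n) % 4 = (((k:Int)+1) - 3*n) % 4 - 1 := by omega
      omega

theorem func_eq_alt (n : Int) : 0 ≤ n → func n = func_alt n := by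
  intro h
  unfold func func_alt
  rw [if_neg (not_lt.mpr h)]
  have hm : 0 ≤ PySem.Int.floordiv n 7 := by
    rw [PySem.Int.floordiv_eq_ediv_of_pos (by norm_num)]
    exact Int.ediv_nonneg h (by norm_num)
  obtain ⟨k, hk⟩ : ∃ k : Nat, PySem.Int.floordiv n 7 = (k : Int) :=
    ⟨(PySem.Int.floordiv n 7).toNat, (Int.toNat_of_nonneg hm).symm⟩
  rw [hk, pvLoopA_eq]
  simp only [pvBuild]

-- ===== VERDICT (by name: the statement is the Claim_ definition above) =====
theorem func_spec : Claim_equal_func := by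
  intro n _ hpre
  unfold Spec_func
  exact func_eq_alt n hpre.1
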